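-- pv_equiv track=rewrite | github.com/speeno/Delphi_portin_project | tools/harness/characterization_test.py | identify_workflows
-- ===== SOURCE A (Python) =====
-- def identify_workflows(session_queries: list[dict]) -> list[dict]:
--     """세션 내 쿼리를 업무 흐름 단위로 분리한다."""
--     workflows = []
--     current = []
--     last_type = None
--
--     for q in session_queries:
--         qtype = q.get("type", "")
--
--         if qtype == "BEGIN" or (not current and qtype in ("INSERT", "UPDATE", "DELETE")):
--             if current:
--                 workflows.append(current)
--             current = [q]
--         elif qtype == "COMMIT" or qtype == "ROLLBACK":
--             current.append(q)
--             workflows.append(current)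
--             current = []
--         else:
--             current.append(q)
--
--         last_type = qtype
--
--     if current:
--         workflows.append(current)
--
--     return workflows
-- ===== SOURCE B (Python) =====
-- def identify_workflows(session_queries: list[dict]) -> list[dict]:
--     """세션 내 쿼리를 업무 흐름 단위로 분리한다."""
--     workflows = []
--     i, n = 0, len(session_queries)
--     while i < n:
--         j = i + 1
--         while (j < n
--                and session_queries[j].get("type", "") != "BEGIN"
--                and session_queries[j - 1].get("type", "") not in ("COMMIT", "ROLLBACK")):
--             j += 1
--         workflows.append(session_queries[i:j])
--         i = j
--     return workflows
-- ===== Notes on version B (the rewrite author's own statement) =====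
-- stated objective: alternative
-- what changed: A's accumulator state machine (a 'current' buffer with flush-on-BEGIN/COMMIT/ROLLBACK rules and a trailing flush) is replaced by a two-pointer span scan: B finds each group boundary pairwise (BEGIN here, or COMMIT/ROLLBACK just before) and emits the slice session_queries[i:j] directly.
import Mathlib
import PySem

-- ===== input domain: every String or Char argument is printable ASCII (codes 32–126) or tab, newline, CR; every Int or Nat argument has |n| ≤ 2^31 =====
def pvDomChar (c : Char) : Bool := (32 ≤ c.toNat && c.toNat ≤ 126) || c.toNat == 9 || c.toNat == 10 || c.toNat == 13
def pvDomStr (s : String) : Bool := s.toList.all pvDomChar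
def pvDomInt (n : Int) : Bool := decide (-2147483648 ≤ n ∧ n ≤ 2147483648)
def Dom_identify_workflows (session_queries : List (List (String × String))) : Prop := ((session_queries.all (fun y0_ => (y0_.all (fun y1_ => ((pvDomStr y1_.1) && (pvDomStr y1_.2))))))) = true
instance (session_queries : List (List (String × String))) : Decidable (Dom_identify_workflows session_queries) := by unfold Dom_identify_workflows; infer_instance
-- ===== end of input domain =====

-- B replaces A's accumulator state machine (current buffer + flush rules) by a two-pointer
-- span scan that slices the list at group boundaries; same O(n) cost, different decomposition.

-- shared rendering of Python's q.get("type", "") on an association-list dict (first match)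
def iwType (q : List (String × String)) : String :=
  PySem.Dict.getD (PySem.Dict.mk q) "type" ""

-- ===== PORT A =====
-- body of A's for-loop (state = (workflows, current))
def iwStep (st : List (List (List (String × String))) × List (List (String × String)))
    (q : List (String × String)) :
    List (List (List (String × String))) × List (List (String × String)) :=
  let qtype := iwType q
  if qtype = "BEGIN" ∨ (st.2 = [] ∧ (qtype = "INSERT" ∨ qtype = "UPDATE" ∨ qtype = "DELETE")) then
    ((if st.2 ≠ [] then st.1 ++ [st.2] else st.1), [q])
  else if qtype = "COMMIT" ∨ qtype = "ROLLBACK" then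
    (st.1 ++ [st.2 ++ [q]], [])
  else
    (st.1, st.2 ++ [q])

def identify_workflows (session_queries : List (List (String × String))) : List (List (List (String × String))) :=
  let r := session_queries.foldl iwStep ([], [])
  if r.2 ≠ [] then r.1 ++ [r.2] else r.1

-- ===== PORT B =====
-- Source B's inner while loop (advance j while no boundary), ported as structural recursion over
-- the suffix after position i: returns (elements absorbed into the current group, the rest).
def iwSpan (prev : List (String × String)) :
    List (List (String × String)) → List (List (String × String)) × List (List (String × String))
  | [] => ([], [])
  | q :: qs =>
    if iwType q = "BEGIN" ∨ (iwType prev = "COMMIT" ∨ iwType prev = "ROLLBACK") then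
      ([], q :: qs)
    else
      let r := iwSpan q qs
      (q :: r.1, r.2)

-- termination measure for the outer loop: the rest is no longer than the input
theorem iwSpan_snd_length (prev : List (String × String)) (qs : List (List (String × String))) :
    (iwSpan prev qs).2.length ≤ qs.length := by
  induction qs generalizing prev with
  | nil => simp [iwSpan]
  | cons q qs ih =>
    simp only [iwSpan]
    split
    · simp
    · simpa using Nat.le_succ_of_le (ih q)

-- Source B's outer while loop: each iteration emits the slice session_queries[i:j] (= head :: span)
-- and continues at i = j (= the rest returned by the span).
def identify_workflows_alt : List (List (String × String)) → List (List (List (String × String)))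
  | [] => []
  | q :: qs =>
    let r := iwSpan q qs
    (q :: r.1) :: identify_workflows_alt r.2
termination_by l => l.length
decreasing_by simpa using Nat.lt_succ_of_le (iwSpan_snd_length q qs)

-- ===== PRECONDITION & SPEC =====
def Spec_identify_workflows (session_queries : List (List (String × String))) (out : List (List (List (String × String)))) : Prop := out = identify_workflows_alt session_queries
instance (session_queries : List (List (String × String))) (out : List (List (List (String × String)))) : Decidable (Spec_identify_workflows session_queries out) := by unfold Spec_identify_workflows; infer_instance

-- ===== CLAIM (what is proved, stated in full; the proofs are below) =====
def Claim_equal_identify_workflows : Prop := ∀ (session_queries : List (List (String × String))), Dom_identify_workflows session_queries → Spec_identify_workflows session_queries (identify_workflows session_queries)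

-- ===== LEMMAS AND PROOFS =====

-- A's loop, rephrased as a recursion carrying only the current group (proof helper).
def iwGo : List (List (String × String)) → List (List (String × String)) → List (List (List (String × String)))
  | cur, [] => if cur = [] then [] else [cur]
  | cur, q :: qs =>
    let t := iwType q
    if t = "BEGIN" ∨ (cur = [] ∧ (t = "INSERT" ∨ t = "UPDATE" ∨ t = "DELETE")) then
      (if cur = [] then [] else [cur]) ++ iwGo [q] qs
    else if t = "COMMIT" ∨ t = "ROLLBACK" then
      (cur ++ [q]) :: iwGo [] qs
    else iwGo (cur ++ [q]) qs

theorem identify_workflows_eq_iwGo (qs : List (List (String × String)))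
    (ws : List (List (List (String × String)))) (cur : List (List (String × String))) :
    (let r := qs.foldl iwStep (ws, cur)
     if r.2 ≠ [] then r.1 ++ [r.2] else r.1) = ws ++ iwGo cur qs := by
  induction qs generalizing ws cur with
  | nil =>
    simp only [List.foldl_nil, iwGo]
    by_cases h : cur = [] <;> simp [h]
  | cons q qs ih =>
    simp only [List.foldl_cons, iwGo]
    by_cases h1 : iwType q = "BEGIN" ∨ (cur = [] ∧ (iwType q = "INSERT" ∨ iwType q = "UPDATE" ∨ iwType q = "DELETE"))
    · rw [show iwStep (ws, cur) q = ((if cur ≠ [] then ws ++ [cur] else ws), [q]) by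
        simp [iwStep, h1], ih, if_pos h1]
      by_cases h : cur = [] <;> simp [h, List.append_assoc]
    · by_cases h2 : iwType q = "COMMIT" ∨ iwType q = "ROLLBACK"
      · rw [show iwStep (ws, cur) q = (ws ++ [cur ++ [q]], []) by simp [iwStep, h1, h2], ih,
          if_neg h1, if_pos h2]
        simp [List.append_assoc]
      · rw [show iwStep (ws, cur) q = (ws, cur ++ [q]) by simp [iwStep, h1, h2], ih,
          if_neg h1, if_neg h2]

theorem iwSpan_of_CR (prev : List (String × String)) (qs : List (List (String × String)))
    (h : iwType prev = "COMMIT" ∨ iwType prev = "ROLLBACK") :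
    iwSpan prev qs = ([], qs) := by
  cases qs with
  | nil => simp [iwSpan]
  | cons q qs => simp [iwSpan, h]

theorem iwGo_eq_alt (qs : List (List (String × String))) :
    (iwGo [] qs = identify_workflows_alt qs) ∧
    (∀ (ys : List (List (String × String))) (l : List (String × String)),
      ¬ (iwType l = "COMMIT" ∨ iwType l = "ROLLBACK") →
      iwGo (ys ++ [l]) qs =
        ((ys ++ [l]) ++ (iwSpan l qs).1) :: identify_workflows_alt (iwSpan l qs).2) := by
  induction qs with
  | nil =>
    constructor
    · simp [iwGo, identify_workflows_alt]
    · intro ys l _; simp [iwGo, iwSpan, identify_workflows_alt]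
  | cons q qs ih =>
    obtain ⟨ih1, ih2⟩ := ih
    constructor
    · simp only [iwGo]
      split
      · rename_i h
        have hq : ¬ (iwType q = "COMMIT" ∨ iwType q = "ROLLBACK") := by
          rcases h with h | ⟨_, h | h | h⟩ <;> rw [h] <;> decide
        rw [show ([q] : List (List (String × String))) = [] ++ [q] from rfl, ih2 [] q hq]
        simp [identify_workflows_alt]
      · rename_i h
        have hb : ¬ iwType q = "BEGIN" := fun hc => h (Or.inl hc)
        split
        · rename_i h2
          rw [ih1]
          simp [identify_workflows_alt, iwSpan_of_CR q qs h2]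
        · rename_i h2
          rw [ih2 [] q h2]
          simp [identify_workflows_alt]
    · intro ys l hl
      simp only [iwGo]
      have hne : ¬ (ys ++ [l] = []) := by simp
      split
      · rename_i h
        have hb : iwType q = "BEGIN" := by
          rcases h with h | ⟨hc, _⟩
          · exact h
          · exact absurd hc hne
        have hq : ¬ (iwType q = "COMMIT" ∨ iwType q = "ROLLBACK") := by rw [hb]; decide
        rw [show ([q] : List (List (String × String))) = [] ++ [q] from rfl, ih2 [] q hq]
        have hspan : iwSpan l (q :: qs) = ([], q :: qs) := by simp [iwSpan, hb]
        simp [hspan, identify_workflows_alt]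
      · rename_i h
        have hb : ¬ iwType q = "BEGIN" := fun hc => h (Or.inl hc)
        have hspan : iwSpan l (q :: qs) = (q :: (iwSpan q qs).1, (iwSpan q qs).2) := by
          simp [iwSpan, hb, hl]
        split
        · rename_i h2
          rw [ih1]
          simp [hspan, iwSpan_of_CR q qs h2]
        · rename_i h2
          rw [ih2 (ys ++ [l]) q h2]
          simp [hspan, List.append_assoc]

-- ===== VERDICT (by name: the statement is the Claim_ definition above) =====
theorem identify_workflows_spec : Claim_equal_identify_workflows := by
  intro s _
  unfold Spec_identify_workflows identify_workflows
  rw [identify_workflows_eq_iwGo s [] []]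
  simp [(iwGo_eq_alt s).1]
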